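-- pv_equiv track=rewrite | github.com/Kennyodb/advent_of_code | 2025/08/main.py | is_only_one_cluster
-- ===== SOURCE A (Python) =====
-- def is_only_one_cluster(clusters):
--     count = 0
--     for level in clusters.items():
--         if len(level[1]) > 1:
--             return False
--         elif len(level[1]) == 1:
--             if count > 0:
--                 return False
--             else:
--                 count = 1
--     return count == 1
-- ===== SOURCE B (Python) =====
-- def is_only_one_cluster(clusters):
--     return sum(len(v) for v in clusters.values()) == 1
-- ===== Notes on version B (the rewrite author's own statement) =====
-- stated objective: simpler
-- what changed: Replaces the stateful early-exit scan (count flag, two returns) with a single flat reduction: the total number of elements over all levels equals 1.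
import Mathlib
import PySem

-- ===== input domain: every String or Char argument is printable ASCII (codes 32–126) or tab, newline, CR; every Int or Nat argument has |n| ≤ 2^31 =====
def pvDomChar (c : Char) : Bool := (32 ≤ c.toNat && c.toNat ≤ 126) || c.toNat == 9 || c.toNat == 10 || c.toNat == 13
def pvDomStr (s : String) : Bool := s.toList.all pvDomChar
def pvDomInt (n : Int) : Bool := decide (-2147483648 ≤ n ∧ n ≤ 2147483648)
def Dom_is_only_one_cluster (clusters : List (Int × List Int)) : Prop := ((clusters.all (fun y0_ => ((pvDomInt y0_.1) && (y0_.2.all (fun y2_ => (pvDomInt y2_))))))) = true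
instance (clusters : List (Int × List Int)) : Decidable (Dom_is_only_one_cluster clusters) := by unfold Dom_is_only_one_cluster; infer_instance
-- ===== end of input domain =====

-- B replaces A's stateful early-exit scan by one flat reduction (total element count == 1); simpler.

-- ===== PORT A =====
-- literal port of A's loop over clusters.items() with the `count` flag and early returns
def isOnlyOneClusterLoop (count : Int) (items : List (Int × List Int)) : Bool :=
  match items with
  | [] => count == 1
  | level :: rest =>
    if level.2.length > 1 then false
    else if level.2.length == 1 then
      (if count > 0 then false else isOnlyOneClusterLoop 1 rest)
    else isOnlyOneClusterLoop count rest

def is_only_one_cluster (clusters : List (Int × List Int)) : Bool :=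
  isOnlyOneClusterLoop 0 clusters

-- ===== PORT B =====
-- sum(len(v) for v in clusters.values()) == 1
def is_only_one_cluster_alt (clusters : List (Int × List Int)) : Bool :=
  (clusters.foldl (fun acc kv => acc + (kv.2.length : Int)) 0) == 1

-- ===== PRECONDITION & SPEC =====
def Spec_is_only_one_cluster (clusters : List (Int × List Int)) (out : Bool) : Prop := out = is_only_one_cluster_alt clusters
instance (clusters : List (Int × List Int)) (out : Bool) : Decidable (Spec_is_only_one_cluster clusters out) := by unfold Spec_is_only_one_cluster; infer_instance

-- ===== CLAIM (what is proved, stated in full; the proofs are below) =====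
def Claim_equal_is_only_one_cluster : Prop := ∀ (clusters : List (Int × List Int)), Dom_is_only_one_cluster clusters → Spec_is_only_one_cluster clusters (is_only_one_cluster clusters)

-- ===== LEMMAS AND PROOFS =====
def pvSumLen (items : List (Int × List Int)) : Int :=
  items.foldl (fun acc kv => acc + (kv.2.length : Int)) 0

theorem pvSumLen_shift (c : Int) (items : List (Int × List Int)) :
    items.foldl (fun acc kv => acc + (kv.2.length : Int)) c = c + pvSumLen items := by
  induction items generalizing c with
  | nil => simp [pvSumLen]
  | cons kv rest ih =>
    simp only [pvSumLen, List.foldl] at *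
    rw [ih, ih (0 + kv.2.length)]
    ring

theorem pvSumLen_cons (kv : Int × List Int) (rest : List (Int × List Int)) :
    pvSumLen (kv :: rest) = (kv.2.length : Int) + pvSumLen rest := by
  show (kv :: rest).foldl (fun acc kv => acc + (kv.2.length : Int)) 0 = _
  rw [List.foldl_cons, pvSumLen_shift]; ring

theorem pvSumLen_nonneg (items : List (Int × List Int)) : 0 ≤ pvSumLen items := by
  induction items with
  | nil => simp [pvSumLen]
  | cons kv rest ih =>
    rw [pvSumLen_cons]; positivity

theorem isOnlyOneClusterLoop_eq (items : List (Int × List Int)) :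
    (isOnlyOneClusterLoop 0 items = (pvSumLen items == 1)) ∧
    (isOnlyOneClusterLoop 1 items = (pvSumLen items == 0)) := by
  induction items with
  | nil => simp [isOnlyOneClusterLoop, pvSumLen]
  | cons kv rest ih =>
    have hs := pvSumLen_cons kv rest
    have hn := pvSumLen_nonneg rest
    constructor <;>
    · simp only [isOnlyOneClusterLoop]
      split_ifs with h1 h2 <;> simp_all <;> omega

-- ===== VERDICT (by name: the statement is the Claim_ definition above) =====
theorem is_only_one_cluster_spec : Claim_equal_is_only_one_cluster := by
  intro clusters _
  unfold Spec_is_only_one_cluster is_only_one_cluster is_only_one_cluster_alt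
  have h := (isOnlyOneClusterLoop_eq clusters).1
  simpa [pvSumLen] using h
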